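-- pv_equiv track=rewrite | github.com/yash-marathe/Primus | primus/backends/megatron/core/pipeline_parallel/zerobubble/scheduler/v1f1b.py | create_whole_pattern
-- ===== SOURCE A (Python) =====
-- def create_whole_pattern(p):
--     whole_pattern = [[0 for _ in range(6)] for _ in range(p)]
--     now = 0
--     for i in range(p):
--         now += 1
--         whole_pattern[i][0] = now
--     for i in range(p):
--         now += 1
--         whole_pattern[p - 1 - i][1] = now
--     now += 1
--     if p % 3 == 0:
--         now += 3
--     cyc = (3 - (p + 2) % 3) % 3
--     for i in range(p):
--         whole_pattern[i][2], whole_pattern[i][4] = now, now + 1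
--         cyc += 1
--         now += 2
--         if cyc == 3:
--             cyc = 0
--             now += 3
--     for i in range(p):
--         whole_pattern[p - 1 - i][3], whole_pattern[p - 1 - i][5] = now, now + 1
--         cyc += 1
--         now += 2
--         if cyc == 3:
--             cyc = 0
--             now += 3
--     for sid in range(p):
--         for i in range(6):
--             whole_pattern[sid][i] %= 6
--     return whole_pattern
-- ===== SOURCE B (Python) =====
-- def create_whole_pattern(p):
--     n0 = 2 * p + 1 + (3 if p % 3 == 0 else 0)
--     c0 = (3 - (p + 2) % 3) % 3
--     n1 = n0 + 2 * p + 3 * ((c0 + p) // 3)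
--     c1 = (c0 + p) % 3
--     return [
--         [
--             (i + 1) % 6,
--             (2 * p - i) % 6,
--             (n0 + 2 * i + 3 * ((c0 + i) // 3)) % 6,
--             (n1 + 2 * (p - 1 - i) + 3 * ((c1 + p - 1 - i) // 3)) % 6,
--             (n0 + 2 * i + 3 * ((c0 + i) // 3) + 1) % 6,
--             (n1 + 2 * (p - 1 - i) + 3 * ((c1 + p - 1 - i) // 3) + 1) % 6,
--         ]
--         for i in range(p)
--     ]
-- ===== Notes on version B (the rewrite author's own statement) =====
-- stated objective: simpler
-- what changed: B drops the running now/cyc counters and the five in-place update loops: each of the six cells of row i is computed directly by a closed-form expression in i and p (mod-6 of an affine term plus a floor-division cycle correction), building every row in one comprehension.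
import Mathlib
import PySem

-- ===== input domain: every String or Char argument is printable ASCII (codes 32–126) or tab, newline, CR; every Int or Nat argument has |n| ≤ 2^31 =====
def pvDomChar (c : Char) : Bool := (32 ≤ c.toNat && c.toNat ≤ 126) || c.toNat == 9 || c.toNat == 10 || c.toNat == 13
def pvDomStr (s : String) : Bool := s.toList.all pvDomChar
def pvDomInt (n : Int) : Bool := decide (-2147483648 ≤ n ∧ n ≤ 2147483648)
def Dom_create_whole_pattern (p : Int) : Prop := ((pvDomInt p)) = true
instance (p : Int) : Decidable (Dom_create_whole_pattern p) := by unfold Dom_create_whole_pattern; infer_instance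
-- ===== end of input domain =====

-- B replaces A's running now/cyc counters by a closed-form mod-6 formula per cell (objective: simpler; same O(p) cost).

-- ===== PORT A =====
-- whole_pattern[r][c] = v  (r always in range in A; getD/set keep the transliteration total)
def pvSetCell (w : List (List Int)) (r c : Nat) (v : Int) : List (List Int) :=
  w.set r ((w.getD r []).set c v)

def create_whole_pattern (p : Int) : List (List Int) :=
  let wp0 := (PySem.List.pyRange 0 p 1).map (fun _ => (PySem.List.pyRange 0 6 1).map (fun _ => (0 : Int)))
  -- for i in range(p): now += 1; whole_pattern[i][0] = now
  let s1 := (PySem.List.pyRange 0 p 1).foldl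
    (fun (st : List (List Int) × Int) i =>
      let now := st.2 + 1
      (pvSetCell st.1 i.toNat 0 now, now)) (wp0, 0)
  -- for i in range(p): now += 1; whole_pattern[p-1-i][1] = now
  let s2 := (PySem.List.pyRange 0 p 1).foldl
    (fun (st : List (List Int) × Int) i =>
      let now := st.2 + 1
      (pvSetCell st.1 (p - 1 - i).toNat 1 now, now)) s1
  let now2 := s2.2 + 1
  let now3 := if PySem.Int.mod p 3 = 0 then now2 + 3 else now2
  let cyc0 := PySem.Int.mod (3 - PySem.Int.mod (p + 2) 3) 3
  -- for i in range(p): [i][2],[i][4] = now, now+1; cyc += 1; now += 2; if cyc == 3: cyc = 0; now += 3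
  let s3 := (PySem.List.pyRange 0 p 1).foldl
    (fun (st : List (List Int) × Int × Int) i =>
      let w := pvSetCell (pvSetCell st.1 i.toNat 2 st.2.1) i.toNat 4 (st.2.1 + 1)
      let cyc := st.2.2 + 1
      let now := st.2.1 + 2
      if cyc = 3 then (w, now + 3, 0) else (w, now, cyc)) (s2.1, now3, cyc0)
  -- for i in range(p): [p-1-i][3],[p-1-i][5] = now, now+1; same counter update
  let s4 := (PySem.List.pyRange 0 p 1).foldl
    (fun (st : List (List Int) × Int × Int) i =>
      let w := pvSetCell (pvSetCell st.1 (p - 1 - i).toNat 3 st.2.1) (p - 1 - i).toNat 5 (st.2.1 + 1)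
      let cyc := st.2.2 + 1
      let now := st.2.1 + 2
      if cyc = 3 then (w, now + 3, 0) else (w, now, cyc)) s3
  -- for sid in range(p): for i in range(6): whole_pattern[sid][i] %= 6
  (PySem.List.pyRange 0 p 1).foldl
    (fun w sid =>
      (PySem.List.pyRange 0 6 1).foldl
        (fun w i => pvSetCell w sid.toNat i.toNat (PySem.Int.mod ((w.getD sid.toNat []).getD i.toNat 0) 6)) w) s4.1

-- ===== PORT B =====
def pvRowB (p n0 c0 n1 c1 i : Int) : List Int :=
  [PySem.Int.mod (i + 1) 6,
   PySem.Int.mod (2 * p - i) 6,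
   PySem.Int.mod (n0 + 2 * i + 3 * PySem.Int.floordiv (c0 + i) 3) 6,
   PySem.Int.mod (n1 + 2 * (p - 1 - i) + 3 * PySem.Int.floordiv (c1 + p - 1 - i) 3) 6,
   PySem.Int.mod (n0 + 2 * i + 3 * PySem.Int.floordiv (c0 + i) 3 + 1) 6,
   PySem.Int.mod (n1 + 2 * (p - 1 - i) + 3 * PySem.Int.floordiv (c1 + p - 1 - i) 3 + 1) 6]

def create_whole_pattern_alt (p : Int) : List (List Int) :=
  let n0 := 2 * p + 1 + (if PySem.Int.mod p 3 = 0 then 3 else 0)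
  let c0 := PySem.Int.mod (3 - PySem.Int.mod (p + 2) 3) 3
  let n1 := n0 + 2 * p + 3 * PySem.Int.floordiv (c0 + p) 3
  let c1 := PySem.Int.mod (c0 + p) 3
  (PySem.List.pyRange 0 p 1).map (fun i => pvRowB p n0 c0 n1 c1 i)

-- ===== PRECONDITION & SPEC =====
def Spec_create_whole_pattern (p : Int) (out : List (List Int)) : Prop := out = create_whole_pattern_alt p
instance (p : Int) (out : List (List Int)) : Decidable (Spec_create_whole_pattern p out) := by unfold Spec_create_whole_pattern; infer_instance

-- ===== CLAIM (what is proved, stated in full; the proofs are below) =====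
def Claim_equal_create_whole_pattern : Prop := ∀ (p : Int), Dom_create_whole_pattern p → Spec_create_whole_pattern p (create_whole_pattern p)

-- ===== LEMMAS AND PROOFS =====

-- getD/set basics
theorem pv_getD_set (w : List (List Int)) (r : Nat) (x : List Int) (j : Nat) (hr : r < w.length) :
    (w.set r x).getD j [] = if j = r then x else w.getD j [] := by
  rcases eq_or_ne j r with rfl | hne
  · rw [if_pos rfl]
    simp only [List.getD_eq_getElem?_getD, List.getElem?_set]
    simp [hr]
  · rw [if_neg hne]
    simp only [List.getD_eq_getElem?_getD, List.getElem?_set]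
    simp [Ne.symm hne]

theorem pvSetCell_getD (w : List (List Int)) (r c : Nat) (v : Int) (j : Nat) (hr : r < w.length) :
    (pvSetCell w r c v).getD j [] = if j = r then (w.getD r []).set c v else w.getD j [] := by
  unfold pvSetCell
  exact pv_getD_set w r _ j hr

theorem pvSetCell_length (w : List (List Int)) (r c : Nat) (v : Int) :
    (pvSetCell w r c v).length = w.length := by
  simp [pvSetCell]

-- Nat-indexed versions of A's five loops (the ports' folds after casting range p)
def pvL1 (k : Nat) (st : List (List Int) × Int) : List (List Int) × Int :=
  (List.range k).foldl (fun st j => (pvSetCell st.1 j 0 (st.2 + 1), st.2 + 1)) st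

def pvL2 (n k : Nat) (st : List (List Int) × Int) : List (List Int) × Int :=
  (List.range k).foldl (fun st j => (pvSetCell st.1 (n - 1 - j) 1 (st.2 + 1), st.2 + 1)) st

def pvStep3 (st : List (List Int) × Int × Int) (j : Nat) : List (List Int) × Int × Int :=
  let w := pvSetCell (pvSetCell st.1 j 2 st.2.1) j 4 (st.2.1 + 1)
  if st.2.2 + 1 = 3 then (w, st.2.1 + 2 + 3, 0) else (w, st.2.1 + 2, st.2.2 + 1)

def pvL3 (k : Nat) (st : List (List Int) × Int × Int) : List (List Int) × Int × Int :=
  (List.range k).foldl pvStep3 st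

def pvStep4 (n : Nat) (st : List (List Int) × Int × Int) (j : Nat) : List (List Int) × Int × Int :=
  let w := pvSetCell (pvSetCell st.1 (n - 1 - j) 3 st.2.1) (n - 1 - j) 5 (st.2.1 + 1)
  if st.2.2 + 1 = 3 then (w, st.2.1 + 2 + 3, 0) else (w, st.2.1 + 2, st.2.2 + 1)

def pvL4 (n k : Nat) (st : List (List Int) × Int × Int) : List (List Int) × Int × Int :=
  (List.range k).foldl (pvStep4 n) st

def pvInner (w : List (List Int)) (sid : Nat) : List (List Int) :=
  (PySem.List.pyRange 0 6 1).foldl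
    (fun w i => pvSetCell w sid i.toNat (PySem.Int.mod ((w.getD sid []).getD i.toNat 0) 6)) w

def pvL5 (k : Nat) (w : List (List Int)) : List (List Int) :=
  (List.range k).foldl (fun w sid => pvInner w sid) w

def pvM6 (r : List Int) : List Int := r.map (fun x => PySem.Int.mod x 6)

-- loop 1
theorem pvL1_succ (k : Nat) (st : List (List Int) × Int) :
    pvL1 (k + 1) st = ((pvSetCell (pvL1 k st).1 k 0 ((pvL1 k st).2 + 1), (pvL1 k st).2 + 1)) := by
  simp [pvL1, List.range_succ]

theorem pvL1_snd (k : Nat) (st : List (List Int) × Int) : (pvL1 k st).2 = st.2 + k := by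
  induction k with
  | zero => simp [pvL1]
  | succ k ih => rw [pvL1_succ, ih]; push_cast; ring

theorem pvL1_len (k : Nat) (st : List (List Int) × Int) : (pvL1 k st).1.length = st.1.length := by
  induction k with
  | zero => simp [pvL1]
  | succ k ih => rw [pvL1_succ]; simp [pvSetCell_length, ih]

theorem pvL1_getD (k : Nat) (st : List (List Int) × Int) (hk : k ≤ st.1.length) (j : Nat) :
    (pvL1 k st).1.getD j [] =
      if j < k then (st.1.getD j []).set 0 (st.2 + j + 1) else st.1.getD j [] := by
  induction k with
  | zero => simp [pvL1]
  | succ k ih =>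
    rw [pvL1_succ]
    have hlt : (k : Nat) < (pvL1 k st).1.length := by rw [pvL1_len]; omega
    rw [pvSetCell_getD _ _ _ _ _ hlt, pvL1_snd]
    rcases Nat.lt_trichotomy j k with h | h | h
    · rw [if_neg (by omega), ih (by omega), if_pos h, if_pos (by omega)]
    · subst h
      rw [if_pos rfl, ih (by omega), if_neg (by omega), if_pos (by omega)]
    · rw [if_neg (by omega), ih (by omega), if_neg (by omega), if_neg (by omega)]

-- loop 2
theorem pvL2_succ (n k : Nat) (st : List (List Int) × Int) :
    pvL2 n (k + 1) st = ((pvSetCell (pvL2 n k st).1 (n - 1 - k) 1 ((pvL2 n k st).2 + 1), (pvL2 n k st).2 + 1)) := by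
  simp [pvL2, List.range_succ]

theorem pvL2_snd (n k : Nat) (st : List (List Int) × Int) : (pvL2 n k st).2 = st.2 + k := by
  induction k with
  | zero => simp [pvL2]
  | succ k ih => rw [pvL2_succ, ih]; push_cast; ring

theorem pvL2_len (n k : Nat) (st : List (List Int) × Int) : (pvL2 n k st).1.length = st.1.length := by
  induction k with
  | zero => simp [pvL2]
  | succ k ih => rw [pvL2_succ]; simp [pvSetCell_length, ih]

theorem pvL2_getD (n k : Nat) (st : List (List Int) × Int) (hn : st.1.length = n) (hk : k ≤ n) (j : Nat) :
    (pvL2 n k st).1.getD j [] =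
      if n - k ≤ j ∧ j < n then (st.1.getD j []).set 1 (st.2 + (n - j)) else st.1.getD j [] := by
  induction k with
  | zero =>
    simp only [pvL2, List.range_zero, List.foldl_nil]
    rw [if_neg (by omega)]
  | succ k ih =>
    rw [pvL2_succ]
    have hlt : n - 1 - k < (pvL2 n k st).1.length := by rw [pvL2_len, hn]; omega
    rw [pvSetCell_getD _ _ _ _ _ hlt, pvL2_snd]
    by_cases h : j = n - 1 - k
    · subst h
      rw [if_pos rfl, ih (by omega), if_neg (by omega), if_pos (by omega)]
      congr 1
      omega
    · rw [if_neg h, ih (by omega)]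
      by_cases h2 : n - k ≤ j ∧ j < n
      · rw [if_pos h2, if_pos (by omega)]
      · rw [if_neg h2, if_neg (by omega)]

-- the cyclic counter: closed form of now/cyc after k steps (shared by loops 3 and 4)
def pvNow (N c : Int) (k : Nat) : Int := N + 2 * k + 3 * PySem.Int.floordiv (c + k) 3
def pvCyc (c : Int) (k : Nat) : Int := PySem.Int.mod (c + k) 3

theorem pv_counter_step (N c : Int) (k : Nat) (_hc : 0 ≤ c ∧ c < 3) :
    (if pvCyc c k + 1 = 3 then (pvNow N c k + 2 + 3, (0 : Int)) else (pvNow N c k + 2, pvCyc c k + 1))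
      = (pvNow N c (k + 1), pvCyc c (k + 1)) := by
  simp only [pvNow, pvCyc,
    PySem.Int.floordiv_eq_ediv_of_pos (a := c + (k : Int)) (by norm_num : (0:Int) < 3),
    PySem.Int.floordiv_eq_ediv_of_pos (a := c + ((k : Nat) + 1 : Nat)) (by norm_num : (0:Int) < 3),
    PySem.Int.mod_eq_emod_of_pos (a := c + (k : Int)) (by norm_num : (0:Int) < 3),
    PySem.Int.mod_eq_emod_of_pos (a := c + ((k : Nat) + 1 : Nat)) (by norm_num : (0:Int) < 3)]
  push_cast
  split_ifs with h <;> simp only [Prod.mk.injEq] <;> constructor <;> omega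

-- loops 3 and 4: state and rows
theorem pvL3_succ (k : Nat) (st : List (List Int) × Int × Int) :
    pvL3 (k + 1) st = pvStep3 (pvL3 k st) k := by
  simp [pvL3, List.range_succ]

theorem pvL3_state (k : Nat) (st : List (List Int) × Int × Int) (hc : 0 ≤ st.2.2 ∧ st.2.2 < 3) :
    (pvL3 k st).2 = (pvNow st.2.1 st.2.2 k, pvCyc st.2.2 k) := by
  induction k with
  | zero =>
    simp only [pvL3, List.range_zero, List.foldl_nil, pvNow, pvCyc, Nat.cast_zero, add_zero, mul_zero]
    rw [PySem.Int.floordiv_eq_ediv_of_pos (by norm_num), PySem.Int.mod_eq_emod_of_pos (by norm_num),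
      Prod.ext_iff]
    obtain ⟨hc1, hc2⟩ := hc
    constructor <;> · simp only []; omega
  | succ k ih =>
    rw [pvL3_succ]
    have h2 := pv_counter_step st.2.1 st.2.2 k hc
    simp only [pvStep3, ih]
    split_ifs with h
    · rw [if_pos h] at h2
      simpa using h2
    · rw [if_neg h] at h2
      simpa using h2

theorem pvL3_len (k : Nat) (st : List (List Int) × Int × Int) : (pvL3 k st).1.length = st.1.length := by
  induction k with
  | zero => simp [pvL3]
  | succ k ih => rw [pvL3_succ]; simp [pvStep3]; split_ifs <;> simp [pvSetCell_length, ih]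

theorem pvL3_getD (k : Nat) (st : List (List Int) × Int × Int) (hk : k ≤ st.1.length)
    (hc : 0 ≤ st.2.2 ∧ st.2.2 < 3) (j : Nat) :
    (pvL3 k st).1.getD j [] =
      if j < k then ((st.1.getD j []).set 2 (pvNow st.2.1 st.2.2 j)).set 4 (pvNow st.2.1 st.2.2 j + 1)
      else st.1.getD j [] := by
  induction k with
  | zero => simp [pvL3]
  | succ k ih =>
    rw [pvL3_succ]
    have hw : (pvStep3 (pvL3 k st) k).1
        = pvSetCell (pvSetCell (pvL3 k st).1 k 2 (pvL3 k st).2.1) k 4 ((pvL3 k st).2.1 + 1) := by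
      simp only [pvStep3]; split_ifs <;> rfl
    rw [hw]
    have hlen1 : (k : Nat) < (pvL3 k st).1.length := by rw [pvL3_len]; omega
    have hlen2 : (k : Nat) < (pvSetCell (pvL3 k st).1 k 2 (pvL3 k st).2.1).length := by
      rw [pvSetCell_length]; exact hlen1
    rw [pvSetCell_getD _ _ _ _ _ hlen2]
    have hst := pvL3_state k st hc
    rcases Nat.lt_trichotomy j k with h | h | h
    · rw [if_neg (by omega), pvSetCell_getD _ _ _ _ _ hlen1, if_neg (by omega),
        ih (by omega), if_pos h, if_pos (by omega)]
    · subst h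
      rw [if_pos rfl, pvSetCell_getD _ _ _ _ _ hlen1, if_pos rfl, ih (by omega),
        if_neg (by omega), if_pos (by omega), hst]
    · rw [if_neg (by omega), pvSetCell_getD _ _ _ _ _ hlen1, if_neg (by omega),
        ih (by omega), if_neg (by omega), if_neg (by omega)]

theorem pvL4_succ (n k : Nat) (st : List (List Int) × Int × Int) :
    pvL4 n (k + 1) st = pvStep4 n (pvL4 n k st) k := by
  simp [pvL4, List.range_succ]

theorem pvL4_state (n k : Nat) (st : List (List Int) × Int × Int) (hc : 0 ≤ st.2.2 ∧ st.2.2 < 3) :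
    (pvL4 n k st).2 = (pvNow st.2.1 st.2.2 k, pvCyc st.2.2 k) := by
  induction k with
  | zero =>
    simp only [pvL4, List.range_zero, List.foldl_nil, pvNow, pvCyc, Nat.cast_zero, add_zero, mul_zero]
    rw [PySem.Int.floordiv_eq_ediv_of_pos (by norm_num), PySem.Int.mod_eq_emod_of_pos (by norm_num),
      Prod.ext_iff]
    obtain ⟨hc1, hc2⟩ := hc
    constructor <;> · simp only []; omega
  | succ k ih =>
    rw [pvL4_succ]
    have h2 := pv_counter_step st.2.1 st.2.2 k hc
    simp only [pvStep4, ih]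
    split_ifs with h
    · rw [if_pos h] at h2; simpa using h2
    · rw [if_neg h] at h2; simpa using h2

theorem pvL4_len (n k : Nat) (st : List (List Int) × Int × Int) : (pvL4 n k st).1.length = st.1.length := by
  induction k with
  | zero => simp [pvL4]
  | succ k ih => rw [pvL4_succ]; simp [pvStep4]; split_ifs <;> simp [pvSetCell_length, ih]

theorem pvL4_getD (n k : Nat) (st : List (List Int) × Int × Int) (hn : st.1.length = n) (hk : k ≤ n)
    (hc : 0 ≤ st.2.2 ∧ st.2.2 < 3) (j : Nat) :
    (pvL4 n k st).1.getD j [] =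
      if n - k ≤ j ∧ j < n then
        ((st.1.getD j []).set 3 (pvNow st.2.1 st.2.2 (n - 1 - j))).set 5 (pvNow st.2.1 st.2.2 (n - 1 - j) + 1)
      else st.1.getD j [] := by
  induction k with
  | zero =>
    simp only [pvL4, List.range_zero, List.foldl_nil]
    rw [if_neg (by omega)]
  | succ k ih =>
    rw [pvL4_succ]
    have hw : (pvStep4 n (pvL4 n k st) k).1
        = pvSetCell (pvSetCell (pvL4 n k st).1 (n - 1 - k) 3 (pvL4 n k st).2.1) (n - 1 - k) 5 ((pvL4 n k st).2.1 + 1) := by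
      simp only [pvStep4]; split_ifs <;> rfl
    rw [hw]
    have hlen1 : n - 1 - k < (pvL4 n k st).1.length := by rw [pvL4_len, hn]; omega
    have hlen2 : n - 1 - k < (pvSetCell (pvL4 n k st).1 (n - 1 - k) 3 (pvL4 n k st).2.1).length := by
      rw [pvSetCell_length]; exact hlen1
    rw [pvSetCell_getD _ _ _ _ _ hlen2]
    have hst := pvL4_state n k st hc
    by_cases h : j = n - 1 - k
    · subst h
      rw [if_pos rfl, pvSetCell_getD _ _ _ _ _ hlen1, if_pos rfl, ih (by omega),
        if_neg (by omega), if_pos (by omega), hst]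
      have : n - 1 - (n - 1 - k) = k := by omega
      rw [this]
    · rw [if_neg h, pvSetCell_getD _ _ _ _ _ hlen1, if_neg h, ih (by omega)]
      by_cases h2 : n - k ≤ j ∧ j < n
      · rw [if_pos h2, if_pos (by omega)]
      · rw [if_neg h2, if_neg (by omega)]

-- loop 5: the two mod-6 sweeps
theorem pv_len6 (l : List Int) (h : l.length = 6) : ∃ a b c d e f, l = [a, b, c, d, e, f] := by
  rcases l with _ | ⟨a, _ | ⟨b, _ | ⟨c, _ | ⟨d, _ | ⟨e, _ | ⟨f, _ | ⟨g, t⟩⟩⟩⟩⟩⟩⟩ <;> simp_all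

theorem pvInner_eq (w : List (List Int)) (sid : Nat) (h : sid < w.length)
    (hrow : (w.getD sid []).length = 6) :
    pvInner w sid = w.set sid (pvM6 (w.getD sid [])) := by
  obtain ⟨a, b, c, d, e, f, hr⟩ := pv_len6 _ hrow
  have h6 : PySem.List.pyRange 0 6 1 = [0, 1, 2, 3, 4, 5] := by decide
  have hR : ∀ (r : List Int), (w.set sid r).getD sid [] = r := fun r => by
    rw [pv_getD_set _ _ _ _ h, if_pos rfl]
  have hRead : ∀ (r : List Int), (w.set sid r)[sid]?.getD [] = r := fun r => hR r
  have hr0 : w[sid]?.getD ([] : List Int) = [a, b, c, d, e, f] := hr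
  simp only [pvInner, h6, List.foldl_cons, List.foldl_nil]
  have t2 : (2 : Int).toNat = 2 := rfl
  have t3 : (3 : Int).toNat = 3 := rfl
  have t4 : (4 : Int).toNat = 4 := rfl
  have t5 : (5 : Int).toNat = 5 := rfl
  norm_num [pvSetCell, hR, hRead, List.set_set, hr, hr0, pvM6, t2, t3, t4, t5]

theorem pvL5_len (k : Nat) (w : List (List Int)) : (pvL5 k w).length = w.length := by
  induction k with
  | zero => simp [pvL5]
  | succ k ih =>
    have h1 : pvL5 (k + 1) w = pvInner (pvL5 k w) k := by simp [pvL5, List.range_succ]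
    have h2 : ∀ (l : List Int) (w' : List (List Int)),
        (l.foldl (fun w i => pvSetCell w k i.toNat (PySem.Int.mod ((w.getD k []).getD i.toNat 0) 6)) w').length
          = w'.length := by
      intro l
      induction l with
      | nil => intro w'; rfl
      | cons x xs ih2 =>
        intro w'
        rw [List.foldl_cons, ih2, pvSetCell_length]
    rw [h1]
    unfold pvInner
    rw [h2, ih]

theorem pvL5_getD (k : Nat) (w : List (List Int)) (hk : k ≤ w.length)
    (hrows : ∀ j, j < w.length → (w.getD j []).length = 6) :
    ∀ j, (pvL5 k w).getD j [] = if j < k then pvM6 (w.getD j []) else w.getD j [] := by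
  induction k with
  | zero => intro j; simp [pvL5]
  | succ k ih =>
    intro j
    have hstep : pvL5 (k + 1) w = pvInner (pvL5 k w) k := by simp [pvL5, List.range_succ]
    rw [hstep]
    have hlen : k < (pvL5 k w).length := by rw [pvL5_len]; omega
    have hrow : ((pvL5 k w).getD k []).length = 6 := by
      rw [ih (by omega) k, if_neg (by omega)]; exact hrows k (by omega)
    rw [pvInner_eq _ _ hlen hrow, pv_getD_set _ _ _ _ hlen]
    rcases Nat.lt_trichotomy j k with h | h | h
    · rw [if_neg (by omega), ih (by omega) j, if_pos h, if_pos (by omega)]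
    · subst h
      rw [if_pos rfl, if_pos (by omega), ih (by omega) j, if_neg (by omega)]
    · rw [if_neg (by omega), ih (by omega) j, if_neg (by omega), if_neg (by omega)]

-- rewriting the port of A into the Nat-indexed pipeline
theorem pvA_pipeline (n : Nat) :
    create_whole_pattern (n : Int) =
      (let wp0 := (List.range n).map (fun _ => ([0, 0, 0, 0, 0, 0] : List Int))
       let s1 := pvL1 n (wp0, 0)
       let s2 := pvL2 n n s1
       let now3 := if PySem.Int.mod (n : Int) 3 = 0 then s2.2 + 1 + 3 else s2.2 + 1
       let cyc0 := PySem.Int.mod (3 - PySem.Int.mod ((n : Int) + 2) 3) 3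
       let s3 := pvL3 n (s2.1, now3, cyc0)
       let s4 := pvL4 n n s3
       pvL5 n s4.1) := by
  have h6 : (PySem.List.pyRange 0 6 1).map (fun _ => (0 : Int)) = [0, 0, 0, 0, 0, 0] := by decide
  simp only [create_whole_pattern, PySem.List.pyRange_zero_natCast, List.foldl_map, List.map_map,
    Function.comp_def, h6]
  have E1 : ∀ st : List (List Int) × Int,
      List.foldl (fun (x : List (List Int) × Int) (y : Nat) =>
        (pvSetCell x.1 (y : Int).toNat 0 (x.2 + 1), x.2 + 1)) st (List.range n) = pvL1 n st := by
    intro st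
    unfold pvL1
    apply PySem.List.foldl_congr_mem
    intro acc x hx
    simp only [Int.toNat_natCast]
  have E2 : ∀ st : List (List Int) × Int,
      List.foldl (fun (x : List (List Int) × Int) (y : Nat) =>
        (pvSetCell x.1 ((n : Int) - 1 - (y : Int)).toNat 1 (x.2 + 1), x.2 + 1)) st (List.range n)
        = pvL2 n n st := by
    intro st
    unfold pvL2
    apply PySem.List.foldl_congr_mem
    intro acc x hx
    have hx' : x < n := List.mem_range.mp hx
    have ht : ((n : Int) - 1 - (x : Int)).toNat = n - 1 - x := by omega
    rw [ht]
  have E3 : ∀ st : List (List Int) × Int × Int,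
      List.foldl (fun (x : List (List Int) × Int × Int) (y : Nat) =>
        if x.2.2 + 1 = 3 then
          (pvSetCell (pvSetCell x.1 (y : Int).toNat 2 x.2.1) (y : Int).toNat 4 (x.2.1 + 1), x.2.1 + 2 + 3, 0)
        else
          (pvSetCell (pvSetCell x.1 (y : Int).toNat 2 x.2.1) (y : Int).toNat 4 (x.2.1 + 1), x.2.1 + 2, x.2.2 + 1))
        st (List.range n) = pvL3 n st := by
    intro st
    unfold pvL3
    apply PySem.List.foldl_congr_mem
    intro acc x hx
    simp only [pvStep3, Int.toNat_natCast]
  have E4 : ∀ st : List (List Int) × Int × Int,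
      List.foldl (fun (x : List (List Int) × Int × Int) (y : Nat) =>
        if x.2.2 + 1 = 3 then
          (pvSetCell (pvSetCell x.1 ((n : Int) - 1 - (y : Int)).toNat 3 x.2.1) ((n : Int) - 1 - (y : Int)).toNat 5 (x.2.1 + 1), x.2.1 + 2 + 3, 0)
        else
          (pvSetCell (pvSetCell x.1 ((n : Int) - 1 - (y : Int)).toNat 3 x.2.1) ((n : Int) - 1 - (y : Int)).toNat 5 (x.2.1 + 1), x.2.1 + 2, x.2.2 + 1))
        st (List.range n) = pvL4 n n st := by
    intro st
    unfold pvL4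
    apply PySem.List.foldl_congr_mem
    intro acc x hx
    have hx' : x < n := List.mem_range.mp hx
    have ht : ((n : Int) - 1 - (x : Int)).toNat = n - 1 - x := by omega
    simp only [pvStep4, ht]
  have E5 : ∀ w : List (List Int),
      List.foldl (fun (x : List (List Int)) (y : Nat) =>
        List.foldl (fun w i => pvSetCell w (y : Int).toNat i.toNat
          (PySem.Int.mod ((w.getD (y : Int).toNat []).getD i.toNat 0) 6)) x (PySem.List.pyRange 0 6 1))
        w (List.range n) = pvL5 n w := by
    intro w
    unfold pvL5 pvInner
    apply PySem.List.foldl_congr_mem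
    intro acc x hx
    simp only [Int.toNat_natCast]
  rw [E1, E2, E3, E4, E5]

theorem pv_nonpos (p : Int) (h : p ≤ 0) :
    create_whole_pattern p = [] ∧ create_whole_pattern_alt p = [] := by
  have hr : PySem.List.pyRange 0 p 1 = [] := by
    simp [PySem.List.pyRange]; omega
  constructor <;> simp [create_whole_pattern, create_whole_pattern_alt, hr]

-- bounds on the cyclic seeds
theorem pv_c0_bounds (p : Int) :
    0 ≤ PySem.Int.mod (3 - PySem.Int.mod (p + 2) 3) 3 ∧
      PySem.Int.mod (3 - PySem.Int.mod (p + 2) 3) 3 < 3 :=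
  ⟨PySem.Int.mod_nonneg _ (by norm_num), PySem.Int.mod_lt _ (by norm_num)⟩

theorem pv_c1_bounds (c : Int) (n : Nat) :
    0 ≤ PySem.Int.mod (c + (n : Int)) 3 ∧ PySem.Int.mod (c + (n : Int)) 3 < 3 :=
  ⟨PySem.Int.mod_nonneg _ (by norm_num), PySem.Int.mod_lt _ (by norm_num)⟩

-- final assembly
theorem pv_main (n : Nat) : create_whole_pattern (n : Int) = create_whole_pattern_alt (n : Int) := by
  rw [pvA_pipeline]
  simp only []
  set wp0 : List (List Int) := (List.range n).map (fun _ => ([0, 0, 0, 0, 0, 0] : List Int)) with hwp0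
  set c0 : Int := PySem.Int.mod (3 - PySem.Int.mod ((n : Int) + 2) 3) 3 with hc0
  have hc0b := pv_c0_bounds (n : Int)
  rw [← hc0] at hc0b
  have hwp0len : wp0.length = n := by simp [hwp0]
  have hwp0get : ∀ j, j < n → wp0.getD j [] = [0, 0, 0, 0, 0, 0] := by
    intro j hj
    rw [hwp0, List.getD_eq_getElem?_getD]
    simp [hj]
  -- after loop 1
  have hs1len : (pvL1 n (wp0, 0)).1.length = n := by rw [pvL1_len]; exact hwp0len
  have hs1snd : (pvL1 n (wp0, 0)).2 = (n : Int) := by rw [pvL1_snd]; simp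
  have hs1get : ∀ j, j < n → (pvL1 n (wp0, 0)).1.getD j [] = [(j : Int) + 1, 0, 0, 0, 0, 0] := by
    intro j hj
    rw [pvL1_getD _ _ hwp0len.ge, if_pos hj, hwp0get j hj]
    norm_num
  set s1 := pvL1 n (wp0, 0) with hs1
  -- after loop 2
  have hs2len : (pvL2 n n s1).1.length = n := by rw [pvL2_len]; exact hs1len
  have hs2snd : (pvL2 n n s1).2 = 2 * (n : Int) := by rw [pvL2_snd, hs1snd]; ring
  have hs2get : ∀ j, j < n →
      (pvL2 n n s1).1.getD j [] = [(j : Int) + 1, 2 * (n : Int) - (j : Int), 0, 0, 0, 0] := by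
    intro j hj
    rw [pvL2_getD n n s1 hs1len (le_refl n), if_pos ⟨by omega, hj⟩, hs1get j hj, hs1snd]
    simp only [List.set_cons_succ, List.set_cons_zero, List.cons.injEq, and_true]
    and_intros <;> first | trivial | omega
  set s2 := pvL2 n n s1 with hs2
  -- loop 3
  set N0 : Int := if PySem.Int.mod (n : Int) 3 = 0 then s2.2 + 1 + 3 else s2.2 + 1 with hN0
  set st3 : List (List Int) × Int × Int := (s2.1, N0, c0) with hst3
  have hst3c : 0 ≤ st3.2.2 ∧ st3.2.2 < 3 := by simp only [hst3]; exact hc0b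
  have hst3len : st3.1.length = n := by simp only [hst3]; exact hs2len
  have hs3get : ∀ j, j < n →
      (pvL3 n st3).1.getD j [] =
        [(j : Int) + 1, 2 * (n : Int) - (j : Int), pvNow N0 c0 j, 0, pvNow N0 c0 j + 1, 0] := by
    intro j hj
    rw [pvL3_getD _ _ hst3len.ge hst3c, if_pos hj]
    simp only [hst3]
    rw [hs2get j hj]
    norm_num
  have hs3st : (pvL3 n st3).2 = (pvNow N0 c0 n, pvCyc c0 n) := by
    rw [pvL3_state _ _ hst3c]
  -- loop 4
  set N1 : Int := pvNow N0 c0 n with hN1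
  set c1 : Int := pvCyc c0 n with hc1v
  have hc1b : 0 ≤ c1 ∧ c1 < 3 := by
    rw [hc1v, pvCyc]
    exact pv_c1_bounds c0 n
  set st4 := pvL3 n st3 with hst4
  have hst4c : 0 ≤ st4.2.2 ∧ st4.2.2 < 3 := by rw [hst4, hs3st]; exact hc1b
  have hst4now : st4.2.1 = N1 := by rw [hst4, hs3st]
  have hst4cyc : st4.2.2 = c1 := by rw [hst4, hs3st]
  have hst4len : st4.1.length = n := by rw [hst4, pvL3_len]; exact hst3len
  have hs4get : ∀ j, j < n →
      (pvL4 n n st4).1.getD j [] =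
        [(j : Int) + 1, 2 * (n : Int) - (j : Int), pvNow N0 c0 j, pvNow N1 c1 (n - 1 - j),
         pvNow N0 c0 j + 1, pvNow N1 c1 (n - 1 - j) + 1] := by
    intro j hj
    rw [pvL4_getD n n st4 hst4len (le_refl n) hst4c, if_pos ⟨by omega, hj⟩, hst4now, hst4cyc]
    rw [show st4.1.getD j [] = (pvL3 n st3).1.getD j [] from rfl, hs3get j hj]
    norm_num
  have hs4len : (pvL4 n n st4).1.length = n := by rw [pvL4_len]; exact hst4len
  -- loop 5
  have hrows : ∀ j, j < (pvL4 n n st4).1.length → ((pvL4 n n st4).1.getD j []).length = 6 := by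
    intro j hj
    rw [hs4len] at hj
    rw [hs4get j hj]; rfl
  have hfin : ∀ j, j < n →
      (pvL5 n (pvL4 n n st4).1).getD j [] =
        pvM6 [(j : Int) + 1, 2 * (n : Int) - (j : Int), pvNow N0 c0 j, pvNow N1 c1 (n - 1 - j),
              pvNow N0 c0 j + 1, pvNow N1 c1 (n - 1 - j) + 1] := by
    intro j hj
    rw [pvL5_getD n _ hs4len.ge hrows j, if_pos hj, hs4get j hj]
  have hfinlen : (pvL5 n (pvL4 n n st4).1).length = n := by rw [pvL5_len]; exact hs4len
  -- the right-hand side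
  rw [create_whole_pattern_alt]
  simp only [PySem.List.pyRange_zero_natCast, List.map_map]
  apply List.ext_getElem
  · simp [hfinlen]
  · intro j hj hj2
    have hjn : j < n := by simpa [hfinlen] using hj
    have hgd : (pvL5 n (pvL4 n n st4).1)[j] = (pvL5 n (pvL4 n n st4).1).getD j [] := by
      rw [List.getD_eq_getElem _ _ hj]
    rw [hgd, hfin j hjn]
    simp only [Function.comp_def, List.getElem_map, List.getElem_range]
    have hN0eq : N0 = 2 * (n : Int) + 1 + (if PySem.Int.mod (n : Int) 3 = 0 then 3 else 0) := by
      rw [hN0, hs2snd]; split_ifs <;> ring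
    have hcast : ((n - 1 - j : Nat) : Int) = (n : Int) - 1 - (j : Int) := by omega
    have m3 : ∀ a : Int, PySem.Int.mod a 3 = a % 3 := fun a =>
      PySem.Int.mod_eq_emod_of_pos (by norm_num)
    have m6 : ∀ a : Int, PySem.Int.mod a 6 = a % 6 := fun a =>
      PySem.Int.mod_eq_emod_of_pos (by norm_num)
    have d3 : ∀ a : Int, PySem.Int.floordiv a 3 = a / 3 := fun a =>
      PySem.Int.floordiv_eq_ediv_of_pos (by norm_num)
    rw [hc1v, hN1]
    simp only [pvM6, pvRowB, List.map_cons, List.map_nil, pvNow, pvCyc, hN0eq, hcast]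
    rw [hc0]
    simp only [m3, m6, d3]
    have harg : ∀ a : Int, a + ((n : Int) - 1 - (j : Int)) = a + (n : Int) - 1 - (j : Int) := by
      intro a; ring
    simp only [harg]

-- ===== VERDICT (by name: the statement is the Claim_ definition above) =====
theorem create_whole_pattern_spec : Claim_equal_create_whole_pattern := by
  intro p _
  unfold Spec_create_whole_pattern
  rcases le_or_gt p 0 with h | h
  · have := pv_nonpos p h
    rw [this.1, this.2]
  · have hn : p = ((p.toNat : Nat) : Int) := by omega
    rw [hn]
    exact pv_main p.toNat
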